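-- pv_equiv track=rewrite | github.com/iznetsss/thesis-project-ivsb | scripts/parse_java_context.py | get_global_header
-- ===== SOURCE A (Python) =====
-- def get_global_header(lines):
--     """Extracts package and import statements from the top of the file."""
--     header = []
--     for line in lines[:50]:
--         stripped = line.strip()
--         if stripped.startswith("package ") or stripped.startswith("import "):
--             header.append(stripped)
--         elif "class " in line or "interface " in line:
--             break
--     return "\n".join(header)
-- ===== SOURCE B (Python) =====
-- def get_global_header(lines):
--     """Extracts package and import statements from the top of the file."""
--     def rec(ls, budget):
--         if budget == 0 or not ls:
--             return ""
--         line, rest = ls[0], ls[1:]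
--         s = line.strip()
--         if s.startswith("package ") or s.startswith("import "):
--             tail = rec(rest, budget - 1)
--             return s if tail == "" else s + "\n" + tail
--         if "class " in line or "interface " in line:
--             return ""
--         return rec(rest, budget - 1)
--     return rec(lines, 50)
-- ===== Notes on version B (the rewrite author's own statement) =====
-- stated objective: alternative
-- what changed: Replaces A's iterative loop that accumulates stripped lines in a list and joins them at the end by a budgeted recursion over the list that builds the result string directly back-to-front (concatenating s + '\n' + tail), with no slice, no accumulator list and no join.
import Mathlib
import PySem

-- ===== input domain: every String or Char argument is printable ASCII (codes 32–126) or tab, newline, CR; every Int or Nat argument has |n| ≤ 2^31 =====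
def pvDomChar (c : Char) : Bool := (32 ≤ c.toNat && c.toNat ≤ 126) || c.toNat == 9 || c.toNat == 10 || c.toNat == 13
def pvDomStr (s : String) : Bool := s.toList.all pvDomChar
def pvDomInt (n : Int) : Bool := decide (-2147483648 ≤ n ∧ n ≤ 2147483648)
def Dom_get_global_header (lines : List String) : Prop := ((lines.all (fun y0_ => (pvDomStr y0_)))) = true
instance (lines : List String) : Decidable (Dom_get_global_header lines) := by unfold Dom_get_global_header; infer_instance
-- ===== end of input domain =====

-- B replaces A's accumulate-in-a-list-then-join loop by a budgeted recursion that builds the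
-- result string directly (alternative decomposition, same cost); equivalence proved on Dom.

-- ===== PORT A =====
-- the for-loop with break: structural recursion over lines[:50] carrying the header accumulator
def pvGoA : List String → List String → List String
  | [], header => header
  | line :: rest, header =>
    let stripped := PySem.Str.strip line
    if PySem.Str.startswith stripped "package " || PySem.Str.startswith stripped "import " then
      pvGoA rest (header ++ [stripped])
    else if PySem.Str.isIn "class " line || PySem.Str.isIn "interface " line then
      header
    else
      pvGoA rest header

def get_global_header (lines : List String) : String :=
  PySem.Str.join "\n" (pvGoA (PySem.List.slice lines none (some 50)) [])

-- ===== PORT B =====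
-- rec(ls, budget): builds the result directly; Python string concatenation s + "\n" + tail is
-- ported exactly as append on the code-point list (String.ofList at the very end).
def pvRecB : List String → Nat → List Char
  | _, 0 => []
  | [], _ + 1 => []
  | line :: rest, budget + 1 =>
    let s := PySem.Str.strip line
    if PySem.Str.startswith s "package " || PySem.Str.startswith s "import " then
      let tail := pvRecB rest budget
      if tail = [] then s.toList else s.toList ++ '\n' :: tail
    else if PySem.Str.isIn "class " line || PySem.Str.isIn "interface " line then
      []
    else
      pvRecB rest budget

def get_global_header_alt (lines : List String) : String :=
  String.ofList (pvRecB lines 50)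

-- ===== PRECONDITION & SPEC =====
def Spec_get_global_header (lines : List String) (out : String) : Prop := out = get_global_header_alt lines
instance (lines : List String) (out : String) : Decidable (Spec_get_global_header lines out) := by unfold Spec_get_global_header; infer_instance

-- ===== CLAIM (what is proved, stated in full; the proofs are below) =====
def Claim_equal_get_global_header : Prop := ∀ (lines : List String), Dom_get_global_header lines → Spec_get_global_header lines (get_global_header lines)

-- ===== LEMMAS AND PROOFS =====
lemma pvGoA_acc (ls : List String) : ∀ acc : List String,
    pvGoA ls acc = acc ++ pvGoA ls [] := by
  induction ls with
  | nil => intro acc; simp [pvGoA]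
  | cons l rest ih =>
    intro acc
    simp only [pvGoA]
    split_ifs with h1 h2
    · rw [List.nil_append, ih (acc ++ [PySem.Str.strip l]), ih [PySem.Str.strip l],
        List.append_assoc]
    · simp
    · exact ih acc

lemma pvGoA_mem_nonempty (ls : List String) :
    ∀ x ∈ pvGoA ls [], x.toList ≠ [] := by
  induction ls with
  | nil => intro x hx; simp [pvGoA] at hx
  | cons l rest ih =>
    intro x hx
    simp only [pvGoA] at hx
    split_ifs at hx with h1 h2
    · rw [pvGoA_acc] at hx
      rcases List.mem_append.1 hx with hx | hx
      · have hx' : x = PySem.Str.strip l := by simpa using hx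
        subst hx'
        rcases Bool.or_eq_true_iff.1 h1 with h | h
        · have := (PySem.Chars.startswith_iff _ _).1 h
          intro hnil
          have := this.length_le
          simp [hnil] at this
        · have := (PySem.Chars.startswith_iff _ _).1 h
          intro hnil
          have := this.length_le
          simp [hnil] at this
      · exact ih x hx
    · simp at hx
    · exact ih x hx

lemma pvJoin_ne_nil (q : String) (qs : List String) (hq : q.toList ≠ []) :
    PySem.Chars.join "\n".toList ((q :: qs).map String.toList) ≠ [] := by
  cases qs with
  | nil => simpa [PySem.Chars.join_singleton] using hq
  | cons r rs =>
    simp only [List.map_cons, PySem.Chars.join_cons_cons]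
    intro h
    apply hq
    exact List.append_eq_nil_iff.1 (List.append_eq_nil_iff.1 h).1 |>.1

lemma pvRecB_eq (ls : List String) : ∀ n : Nat,
    pvRecB ls n = PySem.Chars.join "\n".toList ((pvGoA (ls.take n) []).map String.toList) := by
  induction ls with
  | nil => intro n; cases n <;> simp [pvRecB, pvGoA, PySem.Chars.join_nil]
  | cons l rest ih =>
    intro n
    cases n with
    | zero => simp [pvRecB, pvGoA, PySem.Chars.join_nil]
    | succ m =>
      simp only [pvRecB, List.take_succ_cons, pvGoA]
      by_cases h1 : (PySem.Str.startswith (PySem.Str.strip l) "package "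
          || PySem.Str.startswith (PySem.Str.strip l) "import ") = true
      · rw [if_pos h1, if_pos h1, pvGoA_acc, List.nil_append, ih m]
        cases hg : pvGoA (rest.take m) [] with
        | nil => simp [PySem.Chars.join_nil, PySem.Chars.join_singleton]
        | cons q qs =>
          have hq : q.toList ≠ [] := pvGoA_mem_nonempty _ q (hg ▸ List.mem_cons_self)
          have hne := pvJoin_ne_nil q qs hq
          rw [if_neg hne]
          cases qs <;> simp [PySem.Chars.join_cons_cons, PySem.Chars.join_singleton]
      · rw [if_neg h1, if_neg h1]
        by_cases h2 : (PySem.Str.isIn "class " l || PySem.Str.isIn "interface " l) = true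
        · rw [if_pos h2, if_pos h2]; simp [PySem.Chars.join_nil]
        · rw [if_neg h2, if_neg h2]; exact ih m

-- ===== VERDICT (by name: the statement is the Claim_ definition above) =====
theorem get_global_header_spec : Claim_equal_get_global_header := by
  intro lines _
  unfold Spec_get_global_header get_global_header get_global_header_alt
  rw [pvRecB_eq]
  rw [show PySem.List.slice lines none (some 50) = lines.take 50 from by simp [PySem.List.slice]]
  apply String.toList_injective
  simp [PySem.Str.toList_join]
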